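-- pv_equiv track=rewrite | github.com/tedtedtedte/MusicAndMath_COE | fitness_function.py | fitness_variety
-- ===== SOURCE A (Python) =====
-- def fitness_variety(melody):
--     """多样性：防止死板重复"""
--     score = 0
--     repeat_count = 0
--     for i in range(1, len(melody)):
--         if melody[i] == melody[i-1] and melody[i] != 0:
--             repeat_count += 1
--         else:
--             repeat_count = 0
--         if repeat_count > 3: score -= 5
--     return score
-- ===== SOURCE B (Python) =====
-- def fitness_variety(melody):
--     """多样性：防止死板重复"""
--     total = 0
--     i = 0
--     n = len(melody)
--     while i < n:
--         j = i + 1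
--         while j < n and melody[j] == melody[i]:
--             j += 1
--         if melody[i] != 0 and j - i > 4:
--             total -= 5 * (j - i - 4)
--         i = j
--     return total
-- ===== Notes on version B (the rewrite author's own statement) =====
-- stated objective: simpler
-- what changed: B scans maximal runs of equal values and adds a closed-form penalty -5*(L-4) per nonzero run of length L>4, instead of A's per-element repeat counter with a -5 decrement at every position past the fourth.
import Mathlib
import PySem

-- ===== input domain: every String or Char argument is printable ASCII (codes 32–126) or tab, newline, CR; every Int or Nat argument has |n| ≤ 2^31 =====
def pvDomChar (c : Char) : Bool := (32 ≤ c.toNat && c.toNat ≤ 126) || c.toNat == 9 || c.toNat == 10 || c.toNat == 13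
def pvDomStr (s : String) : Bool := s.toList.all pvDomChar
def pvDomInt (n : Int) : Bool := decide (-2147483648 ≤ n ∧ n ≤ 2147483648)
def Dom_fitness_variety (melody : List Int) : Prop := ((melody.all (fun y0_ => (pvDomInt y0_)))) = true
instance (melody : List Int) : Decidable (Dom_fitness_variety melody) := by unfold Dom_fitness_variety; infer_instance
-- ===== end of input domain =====

-- B replaces A's per-element repeat counter by a run scan with a closed-form penalty per run (simpler decomposition, same O(n) cost).

-- ===== PORT A =====
-- the loop body of A: state (score, repeat_count), prev = melody[i-1], cur = melody[i]
def fvStep (st : Int × Int) (prev cur : Int) : Int × Int :=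
  let rc : Int := if cur = prev ∧ cur ≠ 0 then st.2 + 1 else 0
  (if rc > 3 then st.1 - 5 else st.1, rc)

def fitness_variety (melody : List Int) : Int :=
  ((PySem.List.pyRange 1 (PySem.List.len melody) 1).foldl
    (fun st i => fvStep st (PySem.List.pyGetD melody (i - 1) 0) (PySem.List.pyGetD melody i 0))
    (0, 0)).1

-- ===== PORT B =====
-- inner while loop of B: length of the maximal leading run of v, and the remainder
def fv_run (v : Int) : List Int → Nat × List Int
  | [] => (0, [])
  | x :: xs => if x = v then ((fv_run v xs).1 + 1, (fv_run v xs).2) else (0, x :: xs)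

theorem fv_run_len (v : Int) : ∀ xs : List Int, (fv_run v xs).2.length ≤ xs.length
  | [] => le_refl _
  | x :: xs => by
    simp only [fv_run]
    split
    · exact le_trans (fv_run_len v xs) (Nat.le_succ _)
    · simp

-- outer while loop of B: one maximal run per step, closed-form penalty for it
def fitness_variety_alt : List Int → Int
  | [] => 0
  | x :: xs =>
    (if x ≠ 0 ∧ (((fv_run x xs).1 : Int) + 1) > 4 then
        -5 * ((((fv_run x xs).1 : Int) + 1) - 4) else 0) +
      fitness_variety_alt (fv_run x xs).2
termination_by xs => xs.length
decreasing_by exact Nat.lt_succ_of_le (fv_run_len x xs)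

-- ===== PRECONDITION & SPEC =====
def Spec_fitness_variety (melody : List Int) (out : Int) : Prop := out = fitness_variety_alt melody
instance (melody : List Int) (out : Int) : Decidable (Spec_fitness_variety melody out) := by unfold Spec_fitness_variety; infer_instance

-- ===== CLAIM (what is proved, stated in full; the proofs are below) =====
def Claim_equal_fitness_variety : Prop := ∀ (melody : List Int), Dom_fitness_variety melody → Spec_fitness_variety melody (fitness_variety melody)

-- ===== LEMMAS AND PROOFS =====

-- A's loop, rephrased as structural recursion carrying the previous element
def fvA_go (st : Int × Int) (prev : Int) : List Int → Int × Int
  | [] => st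
  | x :: xs => fvA_go (fvStep st prev x) x xs

theorem rangeA : ∀ (xs : List Int) (x : Int) (st : Int × Int),
    (List.range xs.length).foldl
      (fun st k => fvStep st ((x :: xs).getD k 0) ((x :: xs).getD (k + 1) 0)) st
      = fvA_go st x xs := by
  intro xs
  induction xs with
  | nil => intro x st; simp [fvA_go]
  | cons y ys ih =>
    intro x st
    show (List.range (ys.length + 1)).foldl _ _ = _
    rw [List.range_succ_eq_map, List.foldl_cons, List.foldl_map]
    have hb : (fun (st : Int × Int) (k : Nat) =>
        fvStep st ((x :: y :: ys).getD (k + 1) 0) ((x :: y :: ys).getD (k + 1 + 1) 0))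
        = fun st k => fvStep st ((y :: ys).getD k 0) ((y :: ys).getD (k + 1) 0) := by
      funext st k
      simp
    simp only [Nat.succ_eq_add_one] at *
    rw [hb]
    simp only [List.getD_cons_zero, List.getD_cons_succ]
    exact ih y (fvStep st x y)

theorem A_reduce (x : Int) (xs : List Int) :
    fitness_variety (x :: xs) = (fvA_go (0, 0) x xs).1 := by
  unfold fitness_variety
  have hlen : PySem.List.len (x :: xs) = ((xs.length : Int) + 1) := by
    simp [PySem.List.len_eq]
  rw [hlen, PySem.List.pyRange_one, List.foldl_map]
  have h1 : (((xs.length : Int) + 1) - 1).toNat = xs.length := by omega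
  rw [h1]
  have hb : (fun (st : Int × Int) (k : Nat) =>
      fvStep st (PySem.List.pyGetD (x :: xs) (1 + (k : Int) - 1) 0)
        (PySem.List.pyGetD (x :: xs) (1 + (k : Int)) 0))
      = fun st k => fvStep st ((x :: xs).getD k 0) ((x :: xs).getD (k + 1) 0) := by
    funext st k
    have e1 : (1 : Int) + (k : Int) - 1 = ((k : Nat) : Int) := by omega
    have e2 : (1 : Int) + (k : Int) = (((k + 1 : Nat)) : Int) := by push_cast; ring
    rw [e1, e2, PySem.List.pyGetD_natCast, PySem.List.pyGetD_natCast]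
  rw [hb, rangeA]

theorem fv_key : ∀ (n : Nat) (xs : List Int) (x score rc : Int), xs.length ≤ n → 0 ≤ rc →
    (fvA_go (score, rc) x xs).1 =
      score + (if x = 0 then 0 else -5 * (max 3 (rc + ((fv_run x xs).1 : Int)) - max 3 rc))
        + fitness_variety_alt (fv_run x xs).2 := by
  intro n
  induction n with
  | zero =>
    intro xs x score rc hl _
    have hx : xs = [] := List.length_eq_zero_iff.mp (Nat.le_zero.mp hl)
    subst hx
    simp only [fvA_go, fv_run, fitness_variety_alt]
    split_ifs <;> omega
  | succ n ih =>
    intro xs x score rc hl hrc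
    match xs with
    | [] =>
      simp only [fvA_go, fv_run, fitness_variety_alt]
      split_ifs <;> omega
    | y :: ys =>
      have hys : ys.length ≤ n := by simpa using Nat.succ_le_succ_iff.mp hl
      by_cases hcond : y = x ∧ y ≠ 0
      · -- run continues
        obtain ⟨hyx, hy0⟩ := hcond
        subst hyx
        have hstep : fvStep (score, rc) y y =
            ((if rc + 1 > 3 then score - 5 else score), rc + 1) := by
          simp [fvStep, hy0]
        rw [show fvA_go (score, rc) y (y :: ys) = fvA_go (fvStep (score, rc) y y) y ys from rfl,
          hstep]
        rw [ih ys y _ (rc + 1) hys (by omega)]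
        have hrun : fv_run y (y :: ys) = ((fv_run y ys).1 + 1, (fv_run y ys).2) := by
          simp [fv_run]
        rw [hrun]
        simp only [hy0, if_false]
        generalize fitness_variety_alt (fv_run y ys).2 = t
        push_cast
        split_ifs <;> omega
      · -- run breaks (different value, or a zero)
        have hstep : fvStep (score, rc) x y = (score, 0) := by
          simp [fvStep, hcond]
        rw [show fvA_go (score, rc) x (y :: ys) = fvA_go (fvStep (score, rc) x y) y ys from rfl,
          hstep]
        rw [ih ys y score 0 hys (by omega)]
        by_cases hyx : y = x
        · -- then both are the rest value 0: a run of zeros contributes nothing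
          have hy0 : y = 0 := by
            rcases eq_or_ne y 0 with h | h
            · exact h
            · exact absurd ⟨hyx, h⟩ hcond
          subst hyx
          subst hy0
          simp [fv_run]
        · have hrun : fv_run x (y :: ys) = (0, y :: ys) := by
            simp [fv_run, hyx]
          rw [hrun]
          rw [show fitness_variety_alt (y :: ys) =
              (if y ≠ 0 ∧ (((fv_run y ys).1 : Int) + 1) > 4 then
                -5 * ((((fv_run y ys).1 : Int) + 1) - 4) else 0) +
              fitness_variety_alt (fv_run y ys).2 from by rw [fitness_variety_alt]]
          generalize fitness_variety_alt (fv_run y ys).2 = t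
          have hk : (0 : Int) ≤ ((fv_run y ys).1 : Int) := by positivity
          split_ifs <;> omega

-- ===== VERDICT (by name: the statement is the Claim_ definition above) =====
theorem fitness_variety_spec : Claim_equal_fitness_variety := by
  intro melody _
  show fitness_variety melody = fitness_variety_alt melody
  match melody with
  | [] =>
    rw [show fitness_variety_alt [] = 0 from by rw [fitness_variety_alt]]
    unfold fitness_variety
    rw [PySem.List.pyRange_one_eq_nil (by simp [PySem.List.len_eq])]
    rfl
  | x :: xs =>
    rw [A_reduce, fv_key xs.length xs x 0 0 (le_refl _) (le_refl _)]
    rw [fitness_variety_alt]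
    split_ifs <;> push_cast <;> omega
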